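/- GENERATED by farm/mkstatement.py from design/units.tsv (unit `stb_vorbis_get_frame_float.1`) and the assertions of Vorbis/Spec/GetFrameFloat.lean — do not edit.
   THE STATEMENT of the proof unit `stb_vorbis_get_frame_float.1`: segment 1 of `stb_vorbis_get_frame_float` (22 instructions; entries 0x1196c0;
   exits 0x119737; ranges 0x1196c0-0x119732)
   takes each of its entry assertions to one of its exit assertions (`Vorbis.Spec.stb_vorbis_get_frame_float.Seg1`), given the contracts of its callees.
   What the names mean: Vorbis/Spec/Basic.lean (the shared hypotheses), Vorbis/Spec/GetFrameFloat.lean (the assertions). The theorem to prove: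
   `theorem stb_vorbis_get_frame_float_1_ok : Vorbis.Spec.stb_vorbis_get_frame_float_1.Statement`. -/
import Vorbis.Spec.GetFrameFloat
import Vorbis.Spec.Top
namespace Vorbis.Spec.stb_vorbis_get_frame_float_1
open X86 X86.User Asan

/-- The statement of unit `stb_vorbis_get_frame_float.1`. -/
def Statement : Prop :=
  ∀ (Lay : Layout) (_hLay : Lay.hi = 0x1000000) (μ : Microarch) (_hμ : UserX.MicroOK μ) (u₀ : State)
    (_hcode : HasCodeNat Lay u₀ Vorbis.L.stb_vorbis_get_frame_float.entry Vorbis.Code.code_stb_vorbis_get_frame_float.nat Vorbis.L.stb_vorbis_get_frame_float.size)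
    (_h_vorbis_decode_packet : ∀ (others : List Obj) (frames : List (Nat × FrameLayout)) (len : Nat) (A : Arena) (stored room : Int) (ysz : Nat → Nat), Calls Lay μ Vorbis.WayInv (Vorbis.conv u₀) Vorbis.L.vorbis_decode_packet.entry (Vorbis.Spec.vorbis_decode_packet.spec others frames len A stored room ysz)),
    Vorbis.Spec.stb_vorbis_get_frame_float.Seg1 Lay μ u₀

end Vorbis.Spec.stb_vorbis_get_frame_float_1
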